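-- pv_equiv track=rewrite | github.com/lxriz/Rock-Paper-Scissor-Simulation | engine.py | floating_average
-- ===== SOURCE A (Python) =====
-- def floating_average(data, size):
--     i = 0
--
--     counter = 0
--     sums = 0
--
--     y = []
--     x = []
--
--     while i < len(data):
--         if counter == size:
--             counter = 0
--             sums = sums // size
--             x.append(i)
--             y.append(sums)
--             sums = 0
--
--         sums += data[i]
--         i += 1
--         counter += 1
--
--     return x, y
-- ===== SOURCE B (Python) =====
-- def floating_average(data, size):
--     x = list(range(size, len(data), size))
--     y = [sum(data[i - size:i]) // size for i in x]
--     return x, y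
-- ===== Notes on version B (the rewrite author's own statement) =====
-- stated objective: simpler
-- what changed: Replaces the element-by-element while-loop with running counter/sum state by a direct computation over block boundaries: x = range(size, len(data), size) and each y entry as the floor-divided sum of the slice data[i-size:i]; the per-element Python loop is replaced by C-level range/sum, a constant-factor speedup.
-- outside the precondition, e.g. on floating_average([], 0): A returns ([], []), B raises ValueError; on floating_average([1, 2], 0): A raises ZeroDivisionError, B raises ValueError
import Mathlib
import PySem

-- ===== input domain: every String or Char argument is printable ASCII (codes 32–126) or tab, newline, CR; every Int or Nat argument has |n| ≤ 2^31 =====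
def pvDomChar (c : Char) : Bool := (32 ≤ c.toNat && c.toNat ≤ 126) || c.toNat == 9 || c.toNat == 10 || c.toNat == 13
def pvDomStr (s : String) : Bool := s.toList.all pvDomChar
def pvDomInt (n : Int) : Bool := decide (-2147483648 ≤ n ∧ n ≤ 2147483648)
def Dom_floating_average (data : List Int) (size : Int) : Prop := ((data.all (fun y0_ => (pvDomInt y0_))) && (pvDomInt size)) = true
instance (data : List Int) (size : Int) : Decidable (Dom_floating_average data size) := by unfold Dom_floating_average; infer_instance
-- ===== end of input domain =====

-- B replaces A's element-by-element while-loop (running counter/sum state) by a direct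
-- computation over block boundaries (range of multiples of size + per-block slice sums);
-- objective: simpler. Equivalence is about the return value; neither version mutates its input.

-- ===== PORT A =====
-- Loop state: rest = data.drop i.toNat (so the head of rest is data[i]), i, counter, sums, x, y.
-- Emit branch performs: counter = 0; sums = sums // size; append; sums = 0; then
-- sums += data[i]; i += 1; counter += 1  — hence the (0+1) / (0+d) state below.
def faLoop (data : List Int) (size : Int) : List Int → Int → Int → Int → List Int → List Int → List Int × List Int
  | [], _i, _counter, _sums, x, y => (x, y)
  | d :: rest, i, counter, sums, x, y =>
      if counter = size then
        faLoop data size rest (i + 1) (0 + 1) (0 + d) (x ++ [i]) (y ++ [PySem.Int.floordiv sums size])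
      else
        faLoop data size rest (i + 1) (counter + 1) (sums + d) x y

def floating_average (data : List Int) (size : Int) : List Int × List Int :=
  faLoop data size data 0 0 0 [] []

-- ===== PORT B =====
def floating_average_alt (data : List Int) (size : Int) : List Int × List Int :=
  let x := PySem.List.pyRange size (data.length : Int) size
  (x, x.map (fun i => PySem.Int.floordiv (PySem.List.slice data (some (i - size)) (some i)).sum size))

-- ===== PRECONDITION & SPEC =====
-- Pre_ excludes exactly size == 0: there A raises ZeroDivisionError on nonempty data (and
-- returns ([], []) only on empty data), while B's range(size, len(data), size) raises ValueError.
def Pre_floating_average (data : List Int) (size : Int) : Prop := size ≠ 0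
instance (data : List Int) (size : Int) : Decidable (Pre_floating_average data size) := by unfold Pre_floating_average; infer_instance
def pvWitness_floating_average : List Int × Int := ([1, 2, 3, 4, 5], 2)

def Spec_floating_average (data : List Int) (size : Int) (out : List Int × List Int) : Prop := out = floating_average_alt data size
instance (data : List Int) (size : Int) (out : List Int × List Int) : Decidable (Spec_floating_average data size out) := by unfold Spec_floating_average; infer_instance

-- ===== CLAIM (what is proved, stated in full; the proofs are below) =====
def Claim_equal_floating_average : Prop := ∀ (data : List Int) (size : Int), Dom_floating_average data size → Pre_floating_average data size → Spec_floating_average data size (floating_average data size)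

-- ===== LEMMAS AND PROOFS =====

-- pyRange facts for a general positive / negative step
lemma pyRange_pos_nil (a b s : Int) (hs : 0 < s) (h : b ≤ a) :
    PySem.List.pyRange a b s = [] := by
  rw [PySem.List.pyRange_of_pos a b hs]
  simp [show ¬ a < b by omega]

lemma pyRange_neg_nil (a b s : Int) (hs : s < 0) (h : a ≤ b) :
    PySem.List.pyRange a b s = [] := by
  unfold PySem.List.pyRange
  simp [show s ≠ 0 by omega, show ¬ 0 < s by omega, show ¬ b < a by omega]

lemma pyRange_pos_cons (a b s : Int) (hs : 0 < s) (hab : a < b) :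
    PySem.List.pyRange a b s = a :: PySem.List.pyRange (a + s) b s := by
  rw [PySem.List.pyRange_of_pos a b hs, PySem.List.pyRange_of_pos (a + s) b hs]
  have hx : (0 : Int) ≤ b - a - 1 := by omega
  have hsplit : (b - a + s - 1) / s = (b - a - 1) / s + 1 := by
    have h := Int.add_mul_ediv_right (b - a - 1) 1 (show s ≠ 0 by omega)
    rw [show b - a + s - 1 = b - a - 1 + 1 * s by ring]
    omega
  have hq : 0 ≤ (b - a - 1) / s := Int.ediv_nonneg hx (le_of_lt hs)
  have hn : ((b - a + s - 1) / s).toNat = ((b - a - 1) / s).toNat + 1 := by omega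
  by_cases h2 : a + s < b
  · have : (b - (a + s) + s - 1) = b - a - 1 := by ring
    simp only [hab, if_pos, h2, this, hn, List.range_succ_eq_map, List.map_cons, List.map_map]
    refine congrArg₂ List.cons (by simp) ?_
    apply List.map_congr_left; intro k _
    simp [Function.comp, Nat.succ_eq_add_one]; ring
  · have hz : (b - a - 1) / s = 0 := Int.ediv_eq_zero_of_lt hx (by omega)
    simp [hab, h2, hn, hz, List.range_succ]

-- one-element slice data[i:i+1]
lemma slice_single (data : List Int) (i : Int) (d : Int) (rest : List Int)
    (hi : 0 ≤ i) (hd : data.drop i.toNat = d :: rest) :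
    PySem.List.slice data (some i) (some (i + 1)) = [d] := by
  rw [PySem.List.slice_toNat data hi (by omega)]
  rw [hd]
  have : (i + 1).toNat - i.toNat = 1 := by omega
  simp [this]

-- slice extension on the right: data[a:i+1] = data[a:i] ++ [data[i]]
lemma slice_snoc (data : List Int) (a i : Int) (d : Int) (rest : List Int)
    (ha : 0 ≤ a) (hai : a ≤ i) (hd : data.drop i.toNat = d :: rest) :
    PySem.List.slice data (some a) (some (i + 1)) =
      PySem.List.slice data (some a) (some i) ++ [d] := by
  have hi : 0 ≤ i := le_trans ha hai
  rw [PySem.List.slice_toNat data ha (by omega), PySem.List.slice_toNat data ha hi]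
  have h1 : (i + 1).toNat - a.toNat = (i.toNat - a.toNat) + 1 := by omega
  rw [h1, List.take_add_one]
  congr 1
  have hlen : i.toNat < data.length := by
    have := congrArg List.length hd
    simp at this; omega
  have : (data.drop a.toNat)[i.toNat - a.toNat]? = data[i.toNat]? := by
    rw [List.getElem?_drop]; congr 1; omega
  rw [this]
  have : data[i.toNat]? = some d := by
    have := congrArg (fun l => l[0]?) hd
    simpa [List.getElem?_drop] using this
  simp [this]

-- accumulators come out of faLoop
lemma faLoop_append (data : List Int) (size : Int) :
    ∀ (rest : List Int) (i c s : Int) (x y : List Int),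
      faLoop data size rest i c s x y =
        (x ++ (faLoop data size rest i c s [] []).1,
         y ++ (faLoop data size rest i c s [] []).2) := by
  intro rest
  induction rest with
  | nil => intro i c s x y; simp [faLoop]
  | cons d rest ih =>
      intro i c s x y
      by_cases hc : c = size
      · simp only [faLoop, if_pos hc]
        rw [ih (i+1) (0+1) (0+d) (x ++ [i]) _, ih (i+1) (0+1) (0+d) ([] ++ [i]) _]
        simp
      · simp only [faLoop, if_neg hc]
        rw [ih (i+1) (c+1) (s+d) x y, ih (i+1) (c+1) (s+d) [] []]

-- the main loop/blocks correspondence for positive size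
lemma faLoop_key (data : List Int) (size : Int) (hs : 0 < size) :
    ∀ (rest : List Int) (i c s : Int),
      rest = data.drop i.toNat → 0 ≤ i → 1 ≤ c → c ≤ size → c ≤ i →
      s = (PySem.List.slice data (some (i - c)) (some i)).sum →
      faLoop data size rest i c s [] [] =
        ((PySem.List.pyRange (i + size - c) (data.length : Int) size),
         (PySem.List.pyRange (i + size - c) (data.length : Int) size).map
           (fun m => PySem.Int.floordiv (PySem.List.slice data (some (m - size)) (some m)).sum size)) := by
  intro rest
  induction rest with
  | nil =>
      intro i c s hrest hi hc1 hcs hci hsum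
      have hlen : data.length ≤ i := by
        have := congrArg List.length hrest
        simp at this; omega
      rw [pyRange_pos_nil _ _ _ hs (by omega)]
      simp [faLoop]
  | cons d rest ih =>
      intro i c s hrest hi hc1 hcs hci hsum
      have hlen : i.toNat < data.length := by
        have := congrArg List.length hrest
        simp at this; omega
      have hilen : i < (data.length : Int) := by omega
      have hrest' : rest = data.drop (i + 1).toNat := by
        have : (i + 1).toNat = i.toNat + 1 := by omega
        rw [this, ← List.drop_drop, ← hrest]; simp
      by_cases hc : c = size
      · -- emit block ending at i
        simp only [faLoop, if_pos hc]
        rw [faLoop_append]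
        rw [ih (i+1) (0+1) (0+d) hrest' (by omega) (by omega) (by omega) (by omega)
            (by
              have : (i + 1) - (0 + 1) = i := by ring
              rw [this, slice_single data i d rest hi hrest.symm]
              simp)]
        have harg : i + 1 + size - (0 + 1) = i + size := by ring
        have hhead : i + size - c = i := by omega
        rw [harg, hhead, pyRange_pos_cons i (data.length : Int) size hs hilen]
        subst hc
        simp [hsum]
      · -- keep accumulating
        simp only [faLoop, if_neg hc]
        rw [ih (i+1) (c+1) (s+d) hrest' (by omega) (by omega) (by omega) (by omega)
            (by
              have h1 : (i + 1) - (c + 1) = i - c := by ring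
              rw [h1, slice_snoc data (i - c) i d rest (by omega) (by omega) hrest.symm, hsum]
              simp)]
        have : i + 1 + size - (c + 1) = i + size - c := by ring
        rw [this]

-- negative size: the counter never reaches size, nothing is ever emitted
lemma faLoop_neg (data : List Int) (size : Int) (hs : size < 0) :
    ∀ (rest : List Int) (i c s : Int) (x y : List Int), 0 ≤ c →
      faLoop data size rest i c s x y = (x, y) := by
  intro rest
  induction rest with
  | nil => intro i c s x y _; simp [faLoop]
  | cons d rest ih =>
      intro i c s x y hc
      simp only [faLoop, if_neg (show ¬ c = size by omega)]
      exact ih (i+1) (c+1) (s+d) x y (by omega)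

-- ===== VERDICT (by name: the statement is the Claim_ definition above) =====
theorem floating_average_spec : Claim_equal_floating_average := by
  intro data size _ hpre
  unfold Spec_floating_average floating_average floating_average_alt
  dsimp only
  rcases lt_trichotomy size 0 with hneg | hzero | hpos
  · rw [faLoop_neg data size hneg data 0 0 0 [] [] le_rfl,
        pyRange_neg_nil size (data.length : Int) size hneg (by omega)]
    simp
  · exact absurd hzero hpre
  · cases data with
    | nil =>
        rw [pyRange_pos_nil size ((([] : List Int)).length : Int) size hpos (by simp; omega)]
        simp [faLoop]
    | cons d rest =>
        simp only [faLoop, if_neg (show ¬ (0 : Int) = size by omega)]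
        rw [show (0 : Int) + 1 = 1 by ring, show (0 : Int) + d = d by ring]
        rw [faLoop_key (d :: rest) size hpos rest 1 1 d (by simp)
            (by omega) le_rfl (by omega) le_rfl
            (by rw [show (1 : Int) - 1 = 0 by ring,
                    show (PySem.List.slice (d :: rest) (some 0) (some 1)) =
                      PySem.List.slice (d :: rest) (some 0) (some (0 + 1)) by norm_num,
                    slice_single (d :: rest) 0 d rest le_rfl (by simp)]
                simp)]
        have h1 : (1 : Int) + size - 1 = size := by ring
        rw [h1]
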